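-- pv_equiv track=rewrite | github.com/PunkChameleon/ford-johnson-merge-insertion-sort | fjmi.py | build_jacob_insertion_sequence
-- ===== SOURCE A (Python) =====
-- def jacobsthal(n):
--     # first base case
--     if (n == 0):
--         return 0
--
--     # second base case
--     if (n == 1):
--         return 1
--
--     # recurse!
--     return jacobsthal(n - 1) + 2 * jacobsthal(n - 2)
--
-- def build_jacob_insertion_sequence (array):
--     # Store some variables, set some up for returning
--     array_len = len(array)
--     end_sequence = []
--     jacob_index = 3 # The first one that matters
--
--     # Loop through and create the sequence
--     while jacobsthal(jacob_index) < array_len -1 :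
--         end_sequence.append(jacobsthal(jacob_index))
--         jacob_index += 1
--
--     # Return it for user
--     return end_sequence
-- ===== SOURCE B (Python) =====
-- def build_jacob_insertion_sequence(array):
--     n = len(array)
--     seq = []
--     a, b = 1, 3  # jacobsthal(2), jacobsthal(3)
--     while b < n - 1:
--         seq.append(b)
--         a, b = b, b + 2 * a
--     return seq
-- ===== Notes on version B (the rewrite author's own statement) =====
-- stated objective: alternative
-- what changed: Replaces the exponential recursive jacobsthal() call made twice per while-loop step by a single iterative pair (a,b) carrying consecutive Jacobsthal numbers, computing each sequence element in O(1); measured ~1.5x at large sizes but not consistently, so no speed claim.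
import Mathlib
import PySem

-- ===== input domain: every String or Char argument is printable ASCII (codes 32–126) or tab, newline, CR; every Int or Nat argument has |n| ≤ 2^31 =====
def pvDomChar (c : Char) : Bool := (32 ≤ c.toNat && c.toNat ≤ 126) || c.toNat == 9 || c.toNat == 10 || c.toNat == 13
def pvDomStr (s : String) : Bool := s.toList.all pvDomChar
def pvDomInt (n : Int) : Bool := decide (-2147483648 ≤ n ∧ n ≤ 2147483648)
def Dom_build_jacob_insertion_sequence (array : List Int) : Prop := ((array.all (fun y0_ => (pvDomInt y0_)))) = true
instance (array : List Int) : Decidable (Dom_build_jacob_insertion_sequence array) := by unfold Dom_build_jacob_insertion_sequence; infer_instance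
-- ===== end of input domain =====

-- B replaces the exponential recursive jacobsthal() per loop step by an iterative pair of
-- consecutive Jacobsthal numbers (objective: alternative; same output, no loop-internal recursion).
-- ===== PORT A =====
def jacobA : Nat → Int
  | 0 => 0
  | 1 => 1
  | n + 2 => jacobA (n + 1) + 2 * jacobA n

-- fuel makes the while loop total; array.length + 1 iterations always suffice (jacobA k ≥ k for k ≥ 3)
def loopA : Nat → Int → Nat → List Int → List Int
  | 0, _, _, acc => acc
  | f + 1, len, k, acc =>
      if jacobA k < len - 1 then loopA f len (k + 1) (acc ++ [jacobA k]) else acc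

def build_jacob_insertion_sequence (array : List Int) : List Int :=
  loopA (array.length + 1) (array.length : Int) 3 []

-- ===== PORT B =====
def loopB : Nat → Int → Int → Int → List Int → List Int
  | 0, _, _, _, acc => acc
  | f + 1, n, a, b, acc =>
      if b < n - 1 then loopB f n b (b + 2 * a) (acc ++ [b]) else acc

def build_jacob_insertion_sequence_alt (array : List Int) : List Int :=
  loopB (array.length + 1) (array.length : Int) 1 3 []

-- ===== PRECONDITION & SPEC =====
def Spec_build_jacob_insertion_sequence (array : List Int) (out : List Int) : Prop := out = build_jacob_insertion_sequence_alt array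
instance (array : List Int) (out : List Int) : Decidable (Spec_build_jacob_insertion_sequence array out) := by unfold Spec_build_jacob_insertion_sequence; infer_instance

-- ===== CLAIM (what is proved, stated in full; the proofs are below) =====
def Claim_equal_build_jacob_insertion_sequence : Prop := ∀ (array : List Int), Dom_build_jacob_insertion_sequence array → Spec_build_jacob_insertion_sequence array (build_jacob_insertion_sequence array)

-- ===== LEMMAS AND PROOFS =====

-- ===== VERDICT (by name: the statement is the Claim_ definition above) =====
-- loopB carrying (jacobA k, jacobA (k+1)) is loopA at index k+1
theorem loopB_eq_loopA (f : Nat) (len : Int) (k : Nat) (acc : List Int) :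
    loopB f len (jacobA k) (jacobA (k + 1)) acc = loopA f len (k + 1) acc := by
  induction f generalizing k acc with
  | zero => rfl
  | succ f ih =>
      simp only [loopB, loopA]
      split
      · have h : jacobA (k + 1) + 2 * jacobA k = jacobA (k + 2) := rfl
        rw [h, ih (k + 1)]
      · rfl

theorem build_jacob_insertion_sequence_spec : Claim_equal_build_jacob_insertion_sequence := by
  intro array _
  unfold Spec_build_jacob_insertion_sequence build_jacob_insertion_sequence build_jacob_insertion_sequence_alt
  have h := loopB_eq_loopA (array.length + 1) (array.length : Int) 2 []
  simpa using h.symm
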